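-- pv_equiv track=rewrite | github.com/OZTaekOppa/FastaHandler | scripts/find_merge_fa.py | single_line_fasta
-- ===== SOURCE A (Python) =====
-- def single_line_fasta(lines):
--     """Convert multi-line FASTA to single-line FASTA."""
--     header, seq_lines = None, []
--     for line in lines:
--         if line.startswith(">"):
--             if header:
--                 yield header, ''.join(seq_lines)
--             header = line
--             seq_lines = []
--         else:
--             seq_lines.append(line.upper())
--     if header:
--         yield header, ''.join(seq_lines)
-- ===== SOURCE B (Python) =====
-- from itertools import groupby
--
-- def single_line_fasta(lines):
--     """Convert multi-line FASTA to single-line FASTA (groupby over header/sequence runs)."""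
--     header, seq = None, []
--     for is_header, group in groupby(lines, key=lambda l: l.startswith('>')):
--         if is_header:
--             for line in group:
--                 if header is not None:
--                     yield header, ''.join(seq)
--                 header = line
--                 seq = []
--         else:
--             seq = [l.upper() for l in group]
--     if header is not None:
--         yield header, ''.join(seq)
-- ===== Notes on version B (the rewrite author's own statement) =====
-- stated objective: idiomatic
-- what changed: Instead of a per-line loop that appends sequence lines one by one, B splits the input with itertools.groupby into alternating runs of header and sequence lines and builds each record's sequence from a whole run at once.
import Mathlib
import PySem

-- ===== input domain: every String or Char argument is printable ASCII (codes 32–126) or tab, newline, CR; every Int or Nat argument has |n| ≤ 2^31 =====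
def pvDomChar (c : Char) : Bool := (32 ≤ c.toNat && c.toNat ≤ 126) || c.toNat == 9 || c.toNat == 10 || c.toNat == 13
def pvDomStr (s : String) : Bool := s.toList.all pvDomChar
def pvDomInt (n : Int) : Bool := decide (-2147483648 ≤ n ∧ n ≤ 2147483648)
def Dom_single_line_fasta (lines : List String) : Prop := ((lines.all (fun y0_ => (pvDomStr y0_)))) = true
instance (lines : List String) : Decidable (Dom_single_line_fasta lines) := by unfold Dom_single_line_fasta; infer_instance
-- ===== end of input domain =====

-- B replaces A's per-line loop (which appends sequence lines one at a time) by an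
-- itertools.groupby-style split of the input into alternating header/sequence runs,
-- building each record's sequence from a whole run at once (objective: idiomatic).

-- ===== PORT A =====
-- state: (header, seq_lines, yielded records)
def pvAStep (st : Option String × List String × List (String × String)) (line : String) :
    Option String × List String × List (String × String) :=
  if PySem.Str.startswith line ">" then
    match st.1 with
    | some h =>
        -- Python 'if header:': a present but empty header is falsy and is not yielded
        if h = "" then (some line, [], st.2.2)
        else (some line, [], st.2.2 ++ [(h, PySem.Str.join "" st.2.1)])
    | none => (some line, [], st.2.2)
  else (st.1, st.2.1 ++ [PySem.Str.upper line], st.2.2)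

def single_line_fasta (lines : List String) : List (String × String) :=
  let st := lines.foldl pvAStep (none, [], [])
  match st.1 with
  | some h => if h = "" then st.2.2 else st.2.2 ++ [(h, PySem.Str.join "" st.2.1)]
  | none => st.2.2

-- ===== PORT B =====
-- itertools.groupby(lines, key=λ l. l.startswith ">"): maximal runs of equal key
def pvGroupBy : List String → List (Bool × List String)
  | [] => []
  | l :: ls =>
    let k := PySem.Str.startswith l ">"
    let p := ls.span (fun x => PySem.Str.startswith x ">" == k)
    (k, l :: p.1) :: pvGroupBy p.2
termination_by ls => ls.length
decreasing_by
  simp only [List.span_eq_takeWhile_dropWhile]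
  exact Nat.lt_succ_of_le (List.length_dropWhile_le ..)

-- one header line inside a header run ('if header is not None: yield; header := line; seq := []')
def pvBHeadStep (st : Option String × List String × List (String × String)) (line : String) :
    Option String × List String × List (String × String) :=
  match st.1 with
  | some h => (some line, [], st.2.2 ++ [(h, PySem.Str.join "" st.2.1)])
  | none => (some line, [], st.2.2)

-- one run: header run is processed line by line, a sequence run replaces seq wholesale
def pvBRunStep (st : Option String × List String × List (String × String))
    (r : Bool × List String) : Option String × List String × List (String × String) :=
  if r.1 then r.2.foldl pvBHeadStep st
  else (st.1, r.2.map PySem.Str.upper, st.2.2)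

def single_line_fasta_alt (lines : List String) : List (String × String) :=
  let st := (pvGroupBy lines).foldl pvBRunStep (none, [], [])
  match st.1 with
  | some h => st.2.2 ++ [(h, PySem.Str.join "" st.2.1)]
  | none => st.2.2

-- ===== PRECONDITION & SPEC =====
def Spec_single_line_fasta (lines : List String) (out : List (String × String)) : Prop := out = single_line_fasta_alt lines
instance (lines : List String) (out : List (String × String)) : Decidable (Spec_single_line_fasta lines out) := by unfold Spec_single_line_fasta; infer_instance

-- ===== CLAIM (what is proved, stated in full; the proofs are below) =====
def Claim_equal_single_line_fasta : Prop := ∀ (lines : List String), Dom_single_line_fasta lines → Spec_single_line_fasta lines (single_line_fasta lines)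

-- ===== LEMMAS AND PROOFS =====

-- invariant: the header is absent or a nonempty string (so Python's 'if header:' = 'is not None')
def pvInv (st : Option String × List String × List (String × String)) : Prop :=
  st.1 = none ∨ ∃ h, st.1 = some h ∧ h ≠ ""

theorem pv_sw_ne_empty {l : String} (h : PySem.Str.startswith l ">" = true) : l ≠ "" := by
  intro he; rw [he] at h; exact absurd h (by decide)

-- a run of non-header lines: A appends their uppercases one by one
theorem pv_seq_run (run : List String) (st : Option String × List String × List (String × String))
    (hrun : ∀ l ∈ run, PySem.Str.startswith l ">" = false) :
    run.foldl pvAStep st = (st.1, st.2.1 ++ run.map PySem.Str.upper, st.2.2) := by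
  induction run generalizing st with
  | nil => simp
  | cons l ls ih =>
    have hl : PySem.Str.startswith l ">" = false := hrun l (by simp)
    simp only [List.foldl_cons, List.map_cons]
    rw [pvAStep, hl]
    simp only [Bool.false_eq_true, if_false]
    rw [ih _ (fun x hx => hrun x (by simp [hx]))]
    simp [List.append_assoc]

-- a run of header lines: A's step agrees with B's header step; afterwards the
-- invariant holds and (for a nonempty run) seq is empty
theorem pv_head_run (run : List String) (st : Option String × List String × List (String × String))
    (hInv : pvInv st) (hrun : ∀ l ∈ run, PySem.Str.startswith l ">" = true) :
    run.foldl pvAStep st = run.foldl pvBHeadStep st ∧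
      pvInv (run.foldl pvBHeadStep st) ∧
      (run ≠ [] → (run.foldl pvBHeadStep st).2.1 = []) := by
  induction run generalizing st with
  | nil => exact ⟨rfl, hInv, fun h => absurd rfl h⟩
  | cons l ls ih =>
    have hl : PySem.Str.startswith l ">" = true := hrun l (by simp)
    have hstep : pvAStep st l = pvBHeadStep st l := by
      rcases hInv with h0 | ⟨h, hh, hne⟩
      · simp only [pvAStep, pvBHeadStep, h0, hl]; simp
      · simp only [pvAStep, pvBHeadStep, hh, hl]; simp [hne]
    have hsome : (pvBHeadStep st l).1 = some l := by
      cases h1 : st.1 <;> simp [pvBHeadStep, h1]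
    have hseq : (pvBHeadStep st l).2.1 = [] := by
      cases h1 : st.1 <;> simp [pvBHeadStep, h1]
    have hInv' : pvInv (pvBHeadStep st l) := Or.inr ⟨l, hsome, pv_sw_ne_empty hl⟩
    obtain ⟨he, hi, hs⟩ := ih (pvBHeadStep st l) hInv' (fun x hx => hrun x (by simp [hx]))
    refine ⟨?_, ?_, fun _ => ?_⟩
    · simp only [List.foldl_cons, hstep, he]
    · simpa only [List.foldl_cons] using hi
    · simp only [List.foldl_cons]
      cases ls with
      | nil => simpa using hseq
      | cons a as => exact hs (by simp)

-- main loop correspondence, by fuel on the length of the remaining input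
theorem pv_main (n : Nat) (lines : List String)
    (st : Option String × List String × List (String × String))
    (hn : lines.length ≤ n) (hInv : pvInv st)
    (hcond : ∀ l ls', lines = l :: ls' → (PySem.Str.startswith l ">" = true ∨ st.2.1 = [])) :
    lines.foldl pvAStep st = (pvGroupBy lines).foldl pvBRunStep st ∧
      pvInv (lines.foldl pvAStep st) := by
  induction n generalizing lines st with
  | zero =>
    have : lines = [] := List.length_eq_zero_iff.mp (Nat.le_zero.mp hn)
    subst this; exact ⟨by rw [pvGroupBy]; simp, hInv⟩
  | succ n ih =>
    cases lines with
    | nil => exact ⟨by rw [pvGroupBy]; simp, hInv⟩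
    | cons l ls =>
      rw [pvGroupBy]
      simp only [List.span_eq_takeWhile_dropWhile]
      set k := PySem.Str.startswith l ">" with hk
      set p := fun x => PySem.Str.startswith x ">" == k with hp
      set run := ls.takeWhile p with hrun
      set rest := ls.dropWhile p with hrest
      have hsplit : l :: ls = (l :: run) ++ rest := by
        simp [hrun, hrest, List.takeWhile_append_dropWhile]
      have hlen : rest.length ≤ n := by
        have h1 : rest.length ≤ ls.length := List.length_dropWhile_le ..
        have h2 : ls.length ≤ n := Nat.le_of_succ_le_succ hn
        omega
      have hresthead : ∀ r rs, rest = r :: rs → PySem.Str.startswith r ">" = (!k) := by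
        intro r rs hr
        have hpr : p r = false := by
          have := List.head?_dropWhile_not p ls
          rw [← hrest, hr] at this
          simpa using this
        have hne : PySem.Str.startswith r ">" ≠ k := by
          intro hcontra
          rw [hp] at hpr
          simp only [hcontra, beq_self_eq_true] at hpr
          exact Bool.noConfusion hpr
        cases hk2 : k with
        | false => rw [hk2] at hne; simp only [Bool.not_false]; exact Bool.ne_false_iff.mp hne
        | true => rw [hk2] at hne; simp only [Bool.not_true]; exact Bool.eq_false_iff.mpr hne
      have hmem : ∀ x ∈ run, PySem.Str.startswith x ">" = k := by
        intro x hx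
        have := List.mem_takeWhile_imp hx
        simpa [hp, beq_iff_eq] using this
      rw [show (l :: ls).foldl pvAStep st = rest.foldl pvAStep ((l :: run).foldl pvAStep st) by
        rw [hsplit, List.foldl_append]]
      simp only [List.foldl_cons]
      cases hkv : k with
      | true =>
        have hall : ∀ x ∈ l :: run, PySem.Str.startswith x ">" = true := by
          intro x hx
          rcases List.mem_cons.mp hx with h | h
          · subst h; rw [← hk, hkv]
          · rw [hmem x h, hkv]
        obtain ⟨he, hi, hs⟩ := pv_head_run (l :: run) st hInv hall
        simp only [List.foldl_cons] at he hi hs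
        have hbr : pvBRunStep st (true, l :: run) =
            run.foldl pvBHeadStep (pvBHeadStep st l) := by
          simp [pvBRunStep]
        rw [he, hbr]
        exact ih rest (run.foldl pvBHeadStep (pvBHeadStep st l)) hlen hi
          (fun r rs hr => Or.inr (hs (by simp)))
      | false =>
        have hseq0 : st.2.1 = [] := by
          rcases hcond l ls rfl with h | h
          · rw [← hk, hkv] at h; exact absurd h (by simp)
          · exact h
        have hall : ∀ x ∈ l :: run, PySem.Str.startswith x ">" = false := by
          intro x hx
          rcases List.mem_cons.mp hx with h | h
          · subst h; rw [← hk, hkv]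
          · rw [hmem x h, hkv]
        have he := pv_seq_run (l :: run) st hall
        simp only [List.foldl_cons] at he
        rw [hseq0, List.nil_append] at he
        have hbr : pvBRunStep st (false, l :: run) =
            (st.1, (l :: run).map PySem.Str.upper, st.2.2) := by
          simp [pvBRunStep]
        rw [he, hbr]
        refine ih rest (st.1, (l :: run).map PySem.Str.upper, st.2.2) hlen ?_ ?_
        · rcases hInv with h0 | ⟨h, hh, hne⟩
          · exact Or.inl h0
          · exact Or.inr ⟨h, hh, hne⟩
        · intro r rs hr
          have := hresthead r rs hr
          rw [hkv] at this
          exact Or.inl (by simpa using this)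

-- ===== VERDICT (by name: the statement is the Claim_ definition above) =====
theorem single_line_fasta_spec : Claim_equal_single_line_fasta := by
  intro lines _
  unfold Spec_single_line_fasta single_line_fasta single_line_fasta_alt
  obtain ⟨he, hi⟩ := pv_main lines.length lines (none, [], []) le_rfl (Or.inl rfl)
    (fun l ls' h => Or.inr rfl)
  rw [← he]
  rcases hi with h0 | ⟨h, hh, hne⟩
  · simp only [h0]
  · simp only [hh, hne, if_false]
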